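-- pv_equiv track=rewrite | github.com/JevanB12/final-year-project | backend/sub_issue_resolution.py | _score_sub_issues
-- ===== SOURCE A (Python) =====
-- from typing import Dict, List, Set, Tuple
--
-- def _score_sub_issues(
--     text: str,
--     keywords: Dict[str, Set[str]],
--     tried: Set[str],
-- ) -> List[Tuple[str, int]]:
--     scored: List[Tuple[str, int]] = []
--     for sub_id, cues in keywords.items():
--         if sub_id in tried:
--             continue
--         count = sum(1 for cue in cues if cue in text)
--         scored.append((sub_id, count))
--     scored.sort(key=lambda x: (-x[1], x[0]))
--     return scored
-- ===== SOURCE B (Python) =====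
-- from typing import Dict, List, Set, Tuple
--
-- def _score_sub_issues(
--     text: str,
--     keywords: Dict[str, Set[str]],
--     tried: Set[str],
-- ) -> List[Tuple[str, int]]:
--     # Collect once the set of cues that actually occur in the text (a cue shared
--     # by several sub-issues is searched in the text only once), then score each
--     # untried sub-issue by set intersection.
--     hits = {cue for cues in keywords.values() for cue in cues if cue in text}
--     scored = [(sid, len(cues & hits)) for sid, cues in keywords.items() if sid not in tried]
--     scored.sort(key=lambda x: (-x[1], x[0]))
--     return scored
-- ===== Notes on version B (the rewrite author's own statement) =====
-- stated objective: alternative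
-- what changed: B first computes in one pass the set of all cues present in the text (each distinct cue searched once, deduplicated across sub-issues) and then scores each untried sub-issue by set intersection, instead of A's per-sub-issue substring scan; same final sort.
import Mathlib
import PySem

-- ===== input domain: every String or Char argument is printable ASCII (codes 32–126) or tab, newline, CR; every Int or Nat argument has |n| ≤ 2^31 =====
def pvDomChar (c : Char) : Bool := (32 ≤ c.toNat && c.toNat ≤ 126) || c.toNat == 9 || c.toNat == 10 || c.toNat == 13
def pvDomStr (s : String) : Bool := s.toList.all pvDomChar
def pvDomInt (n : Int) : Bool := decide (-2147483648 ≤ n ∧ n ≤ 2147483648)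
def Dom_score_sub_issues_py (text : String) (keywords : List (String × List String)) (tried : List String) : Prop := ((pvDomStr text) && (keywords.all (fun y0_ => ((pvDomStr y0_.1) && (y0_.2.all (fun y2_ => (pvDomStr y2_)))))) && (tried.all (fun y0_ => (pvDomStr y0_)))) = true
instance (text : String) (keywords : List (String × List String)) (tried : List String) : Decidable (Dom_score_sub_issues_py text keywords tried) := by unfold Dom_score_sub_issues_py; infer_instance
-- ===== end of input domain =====

-- B hoists the substring search out of the per-sub-issue loop: it builds once the set of
-- cues present in the text, then scores each untried sub-issue by intersection with that
-- set; objective: alternative decomposition (same final sort).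

-- ===== PORT A =====
def score_sub_issues_py (text : String) (keywords : List (String × List String)) (tried : List String) : List (String × Int) :=
  let scored : List (String × Int) := keywords.foldl
    (fun acc p =>
      if tried.contains p.1 then acc
      else acc ++ [(p.1, p.2.foldl (fun c cue => if PySem.Str.isIn cue text then c + 1 else c) (0 : Int))])
    []
  PySem.List.sorted2 scored (fun x => -x.2) (fun x => x.1)

-- ===== PORT B =====
def score_sub_issues_py_alt (text : String) (keywords : List (String × List String)) (tried : List String) : List (String × Int) :=
  let hits : PySem.Set String := keywords.foldl
    (fun s p => PySem.Set.update s (p.2.filter (fun cue => PySem.Str.isIn cue text)))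
    PySem.Set.empty
  let scored : List (String × Int) := (keywords.filter (fun p => !tried.contains p.1)).map
    (fun p => (p.1, ((p.2.filter (fun cue => PySem.Set.contains hits cue)).length : Int)))
  PySem.List.sorted2 scored (fun x => -x.2) (fun x => x.1)

-- ===== PRECONDITION & SPEC =====
def Spec_score_sub_issues_py (text : String) (keywords : List (String × List String)) (tried : List String) (out : List (String × Int)) : Prop := out = score_sub_issues_py_alt text keywords tried
instance (text : String) (keywords : List (String × List String)) (tried : List String) (out : List (String × Int)) : Decidable (Spec_score_sub_issues_py text keywords tried out) := by unfold Spec_score_sub_issues_py; infer_instance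

-- ===== CLAIM (what is proved, stated in full; the proofs are below) =====
def Claim_equal_score_sub_issues_py : Prop := ∀ (text : String) (keywords : List (String × List String)) (tried : List String), Dom_score_sub_issues_py text keywords tried → Spec_score_sub_issues_py text keywords tried (score_sub_issues_py text keywords tried)

-- ===== LEMMAS AND PROOFS =====

-- membership in the accumulated hit set: exactly the cues of some sub-issue that occur in the text
theorem pv_mem_hits (text : String) (keywords : List (String × List String))
    (s : PySem.Set String) (cue : String) :
    cue ∈ keywords.foldl
      (fun s p => PySem.Set.update s (p.2.filter (fun c => PySem.Str.isIn c text))) s ↔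
    cue ∈ s ∨ ∃ p ∈ keywords, cue ∈ p.2 ∧ PySem.Str.isIn cue text = true := by
  induction keywords generalizing s with
  | nil => simp
  | cons q t ih =>
      simp only [List.foldl_cons, ih, PySem.Set.mem_update, List.mem_filter, List.mem_cons]
      constructor
      · rintro ((h | ⟨h1, h2⟩) | ⟨p, hp, h1, h2⟩)
        · exact Or.inl h
        · exact Or.inr ⟨q, Or.inl rfl, h1, h2⟩
        · exact Or.inr ⟨p, Or.inr hp, h1, h2⟩
      · rintro (h | ⟨p, (rfl | hp), h1, h2⟩)
        · exact Or.inl (Or.inl h)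
        · exact Or.inl (Or.inr ⟨h1, h2⟩)
        · exact Or.inr ⟨p, hp, h1, h2⟩

theorem score_sub_issues_eq (text : String) (keywords : List (String × List String))
    (tried : List String) :
    score_sub_issues_py text keywords tried = score_sub_issues_py_alt text keywords tried := by
  unfold score_sub_issues_py score_sub_issues_py_alt
  simp only
  congr 1
  -- A's accumulation loop is the filtered map
  have h1 : keywords.foldl
      (fun acc p =>
        if tried.contains p.1 then acc
        else acc ++ [(p.1, p.2.foldl (fun c cue => if PySem.Str.isIn cue text then c + 1 else c) (0 : Int))])
      [] =
      keywords.foldl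
      (fun acc p =>
        if !tried.contains p.1 then
          acc ++ [(p.1, p.2.foldl (fun c cue => if PySem.Str.isIn cue text then c + 1 else c) (0 : Int))]
        else acc)
      [] :=
    PySem.List.foldl_congr_mem _ _ _ _ (by intro acc p _; cases tried.contains p.1 <;> simp)
  rw [h1, PySem.List.foldl_append_if]
  simp only [List.nil_append]
  -- and the per-sub-issue counts agree with the hit-set filter lengths
  apply List.map_congr_left
  intro p hp
  have hpk : p ∈ keywords := (List.mem_filter.mp hp).1
  rw [PySem.List.foldl_if_add_one]
  simp only [zero_add, ← List.countP_eq_length_filter]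
  refine congrArg (fun n : Nat => (p.1, (n : Int))) (List.countP_congr ?_)
  intro cue hcue
  cases h : PySem.Str.isIn cue text with
  | true =>
      have hmem : cue ∈ keywords.foldl
          (fun s p => PySem.Set.update s (p.2.filter (fun c => PySem.Str.isIn c text)))
          PySem.Set.empty :=
        (pv_mem_hits text keywords PySem.Set.empty cue).mpr (Or.inr ⟨p, hpk, hcue, h⟩)
      simp only [true_iff]
      exact (PySem.Set.contains_iff _ _).mpr hmem
  | false =>
      have hnm : cue ∉ keywords.foldl
          (fun s p => PySem.Set.update s (p.2.filter (fun c => PySem.Str.isIn c text)))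
          PySem.Set.empty := by
        intro hmem
        rcases (pv_mem_hits text keywords PySem.Set.empty cue).mp hmem with h0 | ⟨q, _, _, hq⟩
        · simp [PySem.Set.empty] at h0
        · rw [h] at hq; exact Bool.false_ne_true hq
      exact ⟨fun hft => absurd hft Bool.false_ne_true,
             fun hc => absurd ((PySem.Set.contains_iff _ _).mp hc) hnm⟩

-- ===== VERDICT (by name: the statement is the Claim_ definition above) =====
theorem score_sub_issues_py_spec : Claim_equal_score_sub_issues_py := by
  intro text keywords tried _
  exact score_sub_issues_eq text keywords tried
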